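-- pv_equiv track=rewrite | github.com/krich11/qdayscanner | p2pk_scanner/verify_blocks.py | analyze_block_gaps
-- ===== SOURCE A (Python) =====
-- from typing import List, Set, Tuple, Optional
--
-- def analyze_block_gaps(missing_blocks: List[int]) -> List[Tuple[int, int, int]]:
--     """Analyze missing blocks to find continuous gaps."""
--     if not missing_blocks:
--         return []
--
--     gaps = []
--     gap_start = missing_blocks[0]
--     gap_end = gap_start
--
--     for i in range(1, len(missing_blocks)):
--         if missing_blocks[i] == gap_end + 1:
--             gap_end = missing_blocks[i]
--         else:
--             # Gap ended, record it
--             gaps.append((gap_start, gap_end, gap_end - gap_start + 1))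
--             gap_start = gap_end = missing_blocks[i]
--
--     # Don't forget the last gap
--     gaps.append((gap_start, gap_end, gap_end - gap_start + 1))
--
--     return gaps
-- ===== SOURCE B (Python) =====
-- from itertools import groupby
--
-- def analyze_block_gaps(missing_blocks):
--     """Analyze missing blocks to find continuous gaps."""
--     gaps = []
--     for _, run in groupby(enumerate(missing_blocks), key=lambda p: p[1] - p[0]):
--         values = [v for _, v in run]
--         start, end = values[0], values[-1]
--         gaps.append((start, end, end - start + 1))
--     return gaps
-- ===== Notes on version B (the rewrite author's own statement) =====
-- stated objective: idiomatic
-- what changed: Replaces the manual gap_start/gap_end state machine with itertools.groupby over enumerate, keyed by value-minus-index so each maximal consecutive run becomes one group.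
import Mathlib
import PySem

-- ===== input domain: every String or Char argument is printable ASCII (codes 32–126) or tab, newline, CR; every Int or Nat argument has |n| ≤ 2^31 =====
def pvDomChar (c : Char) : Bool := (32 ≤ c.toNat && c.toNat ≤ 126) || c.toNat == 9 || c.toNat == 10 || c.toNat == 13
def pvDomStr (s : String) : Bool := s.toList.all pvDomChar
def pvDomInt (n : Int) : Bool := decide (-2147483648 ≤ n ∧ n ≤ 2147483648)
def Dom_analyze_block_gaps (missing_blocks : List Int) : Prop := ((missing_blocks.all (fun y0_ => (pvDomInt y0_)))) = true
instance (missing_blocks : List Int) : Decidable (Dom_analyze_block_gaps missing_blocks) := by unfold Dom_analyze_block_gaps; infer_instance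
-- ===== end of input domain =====

-- B replaces A's manual gap_start/gap_end state machine by a groupby-style pass keyed by
-- value-minus-index (objective: idiomatic; same O(n) cost).

-- ===== PORT A =====
-- the loop body of A (state = (gaps, gap_start, gap_end))
def stepA (st : List (Int × Int × Int) × Int × Int) (v : Int) : List (Int × Int × Int) × Int × Int :=
  if v = st.2.2 + 1 then (st.1, st.2.1, v)
  else (st.1 ++ [(st.2.1, st.2.2, st.2.2 - st.2.1 + 1)], v, v)

def analyze_block_gaps (missing_blocks : List Int) : List (Int × Int × Int) :=
  match missing_blocks with
  | [] => []
  | x :: rest =>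
    -- 'for i in range(1, len(missing_blocks)): … missing_blocks[i] …' visits exactly the tail
    let st := rest.foldl stepA ([], x, x)
    st.1 ++ [(st.2.1, st.2.2, st.2.2 - st.2.1 + 1)]

-- ===== PORT B =====
-- itertools.groupby over the enumerated list with key p ↦ p.2 - p.1: maximal runs of equal key
def gapGroups : List (Int × Int) → List (List (Int × Int))
  | [] => []
  | p :: rest =>
    (p :: (rest.span (fun q => q.2 - q.1 == p.2 - p.1)).1)
      :: gapGroups (rest.span (fun q => q.2 - q.1 == p.2 - p.1)).2
termination_by l => l.length
decreasing_by
  simp [List.span_eq_takeWhile_dropWhile]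
  exact List.length_dropWhile_le _ _

-- 'values = [v for _, v in run]; start, end = values[0], values[-1]; (start, end, end-start+1)'
def gapOf (g : List (Int × Int)) : Int × Int × Int :=
  match g.map Prod.snd with
  | [] => (0, 0, 0)   -- unreachable: groupby groups are nonempty
  | v :: vs => (v, vs.getLastD v, vs.getLastD v - v + 1)

def analyze_block_gaps_alt (missing_blocks : List Int) : List (Int × Int × Int) :=
  (gapGroups (PySem.List.enumerate missing_blocks)).map gapOf

-- ===== PRECONDITION & SPEC =====
def Spec_analyze_block_gaps (missing_blocks : List Int) (out : List (Int × Int × Int)) : Prop := out = analyze_block_gaps_alt missing_blocks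
instance (missing_blocks : List Int) (out : List (Int × Int × Int)) : Decidable (Spec_analyze_block_gaps missing_blocks out) := by unfold Spec_analyze_block_gaps; infer_instance

-- ===== CLAIM (what is proved, stated in full; the proofs are below) =====
def Claim_equal_analyze_block_gaps : Prop := ∀ (missing_blocks : List Int), Dom_analyze_block_gaps missing_blocks → Spec_analyze_block_gaps missing_blocks (analyze_block_gaps missing_blocks)

-- ===== LEMMAS AND PROOFS =====

lemma gapGroups_nil : gapGroups [] = [] := by rw [gapGroups.eq_def]

lemma gapGroups_cons (p : Int × Int) (rest : List (Int × Int)) :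
    gapGroups (p :: rest) = (p :: (rest.span (fun q => q.2 - q.1 == p.2 - p.1)).1)
      :: gapGroups (rest.span (fun q => q.2 - q.1 == p.2 - p.1)).2 := by
  rw [gapGroups.eq_def]

-- canonical recursive form of A's state machine
def aRec (gs ge : Int) : List Int → List (Int × Int × Int)
  | [] => [(gs, ge, ge - gs + 1)]
  | v :: rest =>
    if v = ge + 1 then aRec gs v rest
    else (gs, ge, ge - gs + 1) :: aRec v v rest

lemma foldA_eq (rest : List Int) : ∀ (acc : List (Int × Int × Int)) (gs ge : Int),
    (let st := rest.foldl stepA (acc, gs, ge)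
     st.1 ++ [(st.2.1, st.2.2, st.2.2 - st.2.1 + 1)]) = acc ++ aRec gs ge rest := by
  induction rest with
  | nil => intro acc gs ge; simp [aRec]
  | cons v rest ih =>
    intro acc gs ge
    by_cases h : v = ge + 1
    · simp [aRec, stepA, h, ih]
    · simp [aRec, stepA, h, ih]

-- the core correspondence: a run in progress (current end ge at index j, pending start gs)
-- versus the span of the remaining enumerated tail keyed by ge - j
lemma run_eq (rest : List Int) : ∀ (j gs ge : Int),
    aRec gs ge rest =
      (gs,
       (((PySem.List.enumerate rest (j+1)).span (fun q => q.2 - q.1 == ge - j)).1.map Prod.snd).getLastD ge,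
       (((PySem.List.enumerate rest (j+1)).span (fun q => q.2 - q.1 == ge - j)).1.map Prod.snd).getLastD ge - gs + 1)
        :: (gapGroups ((PySem.List.enumerate rest (j+1)).span (fun q => q.2 - q.1 == ge - j)).2).map gapOf := by
  induction rest with
  | nil =>
    intro j gs ge
    simp [aRec, PySem.List.enumerate_nil, List.span_eq_takeWhile_dropWhile, gapGroups_nil]
  | cons v rest ih =>
    intro j gs ge
    rw [PySem.List.enumerate_cons]
    by_cases h : v = ge + 1
    · have hp : ((v : Int) - (j+1) == ge - j) = true := by simp; omega
      have hkey : ge - j = v - (j + 1) := by omega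
      simp only [aRec, if_pos h, List.span_eq_takeWhile_dropWhile, List.takeWhile_cons,
        List.dropWhile_cons, hp, if_true, List.map_cons, List.getLastD_cons]
      have := ih (j+1) gs v
      simp only [List.span_eq_takeWhile_dropWhile] at this
      rw [hkey]
      exact this
    · have hp : ((v : Int) - (j+1) == ge - j) = false := by simp; omega
      simp only [aRec, if_neg h, List.span_eq_takeWhile_dropWhile, List.takeWhile_cons,
        List.dropWhile_cons, hp, Bool.false_eq_true, if_false, List.map_nil, List.getLastD_nil]
      congr 1
      rw [gapGroups_cons]
      simp only [List.span_eq_takeWhile_dropWhile, List.map_cons]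
      have := ih (j+1) v v
      simp only [List.span_eq_takeWhile_dropWhile] at this
      rw [this]
      simp [gapOf]

-- ===== VERDICT (by name: the statement is the Claim_ definition above) =====
theorem analyze_block_gaps_spec : Claim_equal_analyze_block_gaps := by
  intro mb _
  unfold Spec_analyze_block_gaps analyze_block_gaps analyze_block_gaps_alt
  match mb with
  | [] => simp [PySem.List.enumerate_nil, gapGroups_nil]
  | x :: rest =>
    rw [PySem.List.enumerate_cons, gapGroups_cons]
    simp only [List.map_cons]
    have hf := foldA_eq rest [] x x
    simp only [List.nil_append] at hf
    rw [hf, run_eq rest 0 x x]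
    simp [gapOf]
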